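-- pv_equiv track=rewrite | github.com/steevenakintilo/YourTwitterAccountData | file.py | get_account_creation_date
-- ===== SOURCE A (Python) =====
-- def get_account_creation_date(full_file):
--   data = ""
--   for f in full_file:
--     if "createdAt" in f:
--       data = f
--       continue
--   data = data.split(":")[1].replace('"',"").replace(" ","")[0:10]
--   return data
-- ===== SOURCE B (Python) =====
-- def get_account_creation_date(full_file):
--     # Collect every matching line, then pick the last one by direct indexing.
--     hits = [f for f in full_file if "createdAt" in f]
--     data = hits[-1] if hits else ""
--     # Locate the field directly: it starts right after the first ":".
--     i = data.index(":")
--     # One early-stopping scan instead of split/replace/replace/slice: collect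
--     # non-space, non-quote chars until the next ":" or 10 chars are collected.
--     out = []
--     for ch in data[i + 1:]:
--         if ch == ":":
--             break
--         if ch != '"' and ch != " ":
--             out.append(ch)
--             if len(out) == 10:
--                 break
--     return "".join(out)
-- ===== Notes on version B (the rewrite author's own statement) =====
-- stated objective: alternative
-- what changed: B collects all matching lines into a list and indexes the last one instead of overwriting an accumulator across the scan, and replaces the split/replace/replace/slice pipeline by index(':') plus one early-stopping scan that collects up to 10 non-space non-quote characters until the next colon.
import Mathlib
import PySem

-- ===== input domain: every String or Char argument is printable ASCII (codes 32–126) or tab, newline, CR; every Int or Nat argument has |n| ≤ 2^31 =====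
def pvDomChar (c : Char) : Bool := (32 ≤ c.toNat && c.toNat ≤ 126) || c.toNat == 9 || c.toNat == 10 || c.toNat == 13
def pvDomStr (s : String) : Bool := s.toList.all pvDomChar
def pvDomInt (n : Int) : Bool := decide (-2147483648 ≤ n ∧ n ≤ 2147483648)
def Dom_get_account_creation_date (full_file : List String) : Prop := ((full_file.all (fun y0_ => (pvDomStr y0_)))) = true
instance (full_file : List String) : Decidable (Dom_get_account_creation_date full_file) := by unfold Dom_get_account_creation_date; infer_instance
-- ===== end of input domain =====

-- B collects all matching lines and indexes the last, then locates the field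
-- with index(':') and one early-stopping scan instead of A's overwrite loop
-- plus split/replace/replace/slice pipeline. Objective: alternative.

-- ===== PORT A =====
def get_account_creation_date (full_file : List String) : String :=
  let data := full_file.foldl
    (fun data f => if PySem.Str.isIn "createdAt" f then f else data) ""
  let data := (PySem.List.pyGet? ((PySem.Str.split? data ":").getD []) 1).getD ""
  PySem.Str.slice (PySem.Str.replace (PySem.Str.replace data "\"" "") " " "") (some 0) (some 10)

-- ===== PORT B =====
-- the for-loop with its two `break`s, as structural recursion over the chars
def pvExtract : List Char → List Char → List Char
  | [], out => out
  | ch :: rest, out =>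
    if ch = ':' then out
    else if !(ch == '"') && !(ch == ' ') then
      if (out ++ [ch]).length = 10 then out ++ [ch]
      else pvExtract rest (out ++ [ch])
    else pvExtract rest out

def get_account_creation_date_alt (full_file : List String) : String :=
  let hits := full_file.filter (fun f => PySem.Str.isIn "createdAt" f)
  let data := if hits.isEmpty then "" else (PySem.List.pyGet? hits (-1)).getD ""
  -- data.index(":"): Chars.find is -1 where Python raises ValueError (outside Pre_)
  let i := PySem.Chars.find data.toList [':']
  String.ofList (pvExtract (PySem.List.slice data.toList (some (i + 1)) none) [])

-- ===== PRECONDITION & SPEC =====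
-- Pre_ excludes exactly the inputs on which the Python A raises IndexError:
-- no line contains "createdAt", or the last such line has no ":" (then
-- data.split(":")[1] is out of range).
def Pre_get_account_creation_date (full_file : List String) : Prop :=
  ((full_file.reverse.find? (fun f => PySem.Str.isIn "createdAt" f)).map
    (fun f => PySem.Str.isIn ":" f)).getD false = true
instance (full_file : List String) : Decidable (Pre_get_account_creation_date full_file) := by
  unfold Pre_get_account_creation_date; infer_instance

def pvWitness_get_account_creation_date : List String :=
  ["\"createdAt\" : \"2020-01-02T03:04:05\""]

def Spec_get_account_creation_date (full_file : List String) (out : String) : Prop := out = get_account_creation_date_alt full_file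
instance (full_file : List String) (out : String) : Decidable (Spec_get_account_creation_date full_file out) := by unfold Spec_get_account_creation_date; infer_instance

-- ===== CLAIM (what is proved, stated in full; the proofs are below) =====
def Claim_equal_get_account_creation_date : Prop := ∀ (full_file : List String), Dom_get_account_creation_date full_file → Pre_get_account_creation_date full_file → Spec_get_account_creation_date full_file (get_account_creation_date full_file)

-- ===== LEMMAS AND PROOFS =====

-- simple reference splitter on ':' used only in the proofs
def pvSplitColon (cur : List Char) : List Char → List (List Char)
  | [] => [cur]
  | c :: t => if c = ':' then cur :: pvSplitColon [] t else pvSplitColon (cur ++ [c]) t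

-- A's forward overwrite loop = last element of the filtered list.
theorem pvFoldl_eq_filter_getLast (p : String → Bool) :
    ∀ (l : List String) (acc : String),
      l.foldl (fun d f => if p f then f else d) acc
        = ((l.filter p).getLast?).getD acc := by
  intro l
  induction l with
  | nil => intro acc; simp
  | cons f t ih =>
      intro acc
      simp only [List.foldl_cons, ih, List.filter_cons]
      cases hp : p f
      · simp
      · simp only [if_pos rfl]
        cases h : (t.filter p).getLast? with
        | some x => simp [List.getLast?_cons, h]
        | none =>
            have : t.filter p = [] := by
              cases hf : t.filter p with
              | nil => rfl
              | cons a b => rw [hf] at h; simp [List.getLast?_cons] at h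
            simp [this]

-- find? from the back = last element of the filtered list
theorem pvFind_rev_eq_filter_getLast (p : String → Bool) (l : List String) :
    l.reverse.find? p = (l.filter p).getLast? := by
  have hfind : ∀ (m : List String), m.find? p = (m.filter p).head? := by
    intro m
    induction m with
    | nil => simp
    | cons a t ih =>
        cases hp : p a
        · simp only [List.find?_cons, hp, List.filter_cons, Bool.false_eq_true,
            if_false, ih]
        · simp [List.find?_cons, hp, List.filter_cons]
  rw [hfind, List.filter_reverse, List.head?_reverse]

-- splitOn.go on a one-char separator computes pvSplitColon
theorem pvGo_splitColon :
    ∀ (l : List Char) (fuel : Nat) (cur : List Char) (acc : List (List Char)),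
      l.length ≤ fuel →
      PySem.Chars.splitOn.go [':'] fuel l cur acc
        = acc.reverse ++ pvSplitColon cur.reverse l := by
  intro l
  induction l with
  | nil =>
      intro fuel cur acc _
      cases fuel <;> simp [PySem.Chars.splitOn.go, pvSplitColon]
  | cons c t ih =>
      intro fuel cur acc hlen
      cases fuel with
      | zero => simp at hlen
      | succ n =>
          have hn : t.length ≤ n := by simpa using hlen
          by_cases hc : c = ':'
          · subst hc
            have hpre : [':'].isPrefixOf (':' :: t) = true := by
              simp [List.isPrefixOf]
            simp only [PySem.Chars.splitOn.go, hpre, if_pos,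
              show List.drop [':'].length (':' :: t) = t from rfl]
            rw [ih n [] (cur.reverse :: acc) hn]
            simp [pvSplitColon]
          · have hb : (':' == c) = false := by
              simp only [beq_eq_false_iff_ne, ne_eq]
              exact fun h => hc h.symm
            have hpre : [':'].isPrefixOf (c :: t) = false := by
              simp [List.isPrefixOf, hb]
            simp only [PySem.Chars.splitOn.go, hpre, Bool.false_eq_true, if_false]
            rw [ih n (c :: cur) acc hn]
            simp [pvSplitColon, hc]

theorem pvSplitOn_eq (l : List Char) :
    PySem.Chars.splitOn l [':'] = pvSplitColon [] l := by
  simpa using pvGo_splitColon l (l.length + 1) [] [] (by omega)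

-- pvSplitColon across the first colon
theorem pvSplitColon_append (pre : List Char) (hpre : ':' ∉ pre) (rest : List Char) :
    ∀ cur, pvSplitColon cur (pre ++ ':' :: rest)
      = (cur ++ pre) :: pvSplitColon [] rest := by
  induction pre with
  | nil => intro cur; simp [pvSplitColon]
  | cons a t ih =>
      intro cur
      have ha : a ≠ ':' := fun h => hpre (h ▸ List.mem_cons_self ..)
      have ht : ':' ∉ t := fun h => hpre (List.mem_cons_of_mem _ h)
      simp only [List.cons_append, pvSplitColon, if_neg ha, ih ht]
      simp

-- head of pvSplitColon = collected prefix up to the next colon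
theorem pvSplitColon_head :
    ∀ (rest cur : List Char),
      (pvSplitColon cur rest).head? = some (cur ++ rest.takeWhile (fun c => !(c == ':'))) := by
  intro rest
  induction rest with
  | nil => intro cur; simp [pvSplitColon]
  | cons c t ih =>
      intro cur
      by_cases hc : c = ':'
      · subst hc; simp [pvSplitColon, List.takeWhile_cons]
      · simp [pvSplitColon, hc, ih, List.takeWhile_cons]

-- replace(s, [c], []) removes every occurrence of c.
theorem pvGo_filter (c : Char) :
    ∀ (l : List Char) (fuel : Nat) (acc : List Char), l.length ≤ fuel →
      PySem.Chars.replace.go [c] [] fuel l acc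
        = acc.reverse ++ l.filter (fun x => x != c) := by
  intro l
  induction l with
  | nil =>
      intro fuel acc _
      cases fuel <;> simp [PySem.Chars.replace.go]
  | cons a t ih =>
      intro fuel acc hlen
      cases fuel with
      | zero => simp at hlen
      | succ n =>
          have hn : t.length ≤ n := by simpa using hlen
          by_cases hac : c = a
          · subst hac
            have hpre : [c].isPrefixOf (c :: t) = true := by
              simp [List.isPrefixOf]
            simp only [PySem.Chars.replace.go, hpre, if_pos,
              show List.drop [c].length (c :: t) = t from rfl,
              List.reverse_nil, List.nil_append]
            rw [ih n acc hn]
            simp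
          · have hb : (c == a) = false := by
              simpa using hac
            have hb' : (a == c) = false := by
              simp only [beq_eq_false_iff_ne, ne_eq]
              exact fun h => hac h.symm
            have hpre : [c].isPrefixOf (a :: t) = false := by
              simp [List.isPrefixOf, hb]
            simp only [PySem.Chars.replace.go, hpre, Bool.false_eq_true, if_false]
            rw [ih n (a :: acc) hn]
            simp [bne, hb']

theorem pvReplace_filter (c : Char) (l : List Char) :
    PySem.Chars.replace l [c] [] = l.filter (fun x => x != c) := by
  have h : ([c].isEmpty) = false := rfl
  simp only [PySem.Chars.replace, h, Bool.false_eq_true, if_false]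
  simpa using pvGo_filter c l l.length [] (Nat.le_refl _)

-- B's scan collects up to 10 good chars of the segment before the next colon
theorem pvExtract_collect :
    ∀ (rest out : List Char), out.length < 10 →
      pvExtract rest out
        = out ++ ((rest.takeWhile (fun c => !(c == ':'))).filter
            (fun ch => !(ch == '"') && !(ch == ' '))).take (10 - out.length) := by
  intro rest
  induction rest with
  | nil => intro out _; simp [pvExtract]
  | cons c t ih =>
      intro out hlen
      by_cases hc : c = ':'
      · subst hc; simp [pvExtract, List.takeWhile_cons]
      · by_cases hg : (!(c == '"') && !(c == ' ')) = true
        · simp only [pvExtract, if_neg hc, hg, if_pos,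
            List.takeWhile_cons, beq_iff_eq, hc, not_false_iff, decide_true,
            Bool.not_eq_true']
          by_cases h10 : (out ++ [c]).length = 10
          · have h1 : 10 - out.length = 1 := by
              simp at h10; omega
            simp [h10, List.takeWhile_cons, hc, List.filter_cons, hg, h1]
          · have hl1 : out.length + 1 ≠ 10 := by simpa using h10
            have hlt : (out ++ [c]).length < 10 := by simp; omega
            simp only [h10, if_false]
            rw [ih (out ++ [c]) hlt]
            have : (10 - out.length) = (10 - (out ++ [c]).length) + 1 := by
              simp; omega
            simp [List.takeWhile_cons, hc, List.filter_cons, hg, this]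
        · simp only [pvExtract, if_neg hc, hg, if_false]
          rw [ih out hlen]
          simp [List.takeWhile_cons, hc, List.filter_cons, hg]

-- data.index(":") finds exactly the length of the colon-free prefix
theorem pvFind_colon (pre rest : List Char) (hpre : ':' ∉ pre) :
    PySem.Chars.find (pre ++ ':' :: rest) [':'] = (pre.length : Int) := by
  set s := pre ++ ':' :: rest with hs
  have hin : [':'] <:+: s := ⟨pre, rest, by simp [hs]⟩
  have hne : PySem.Chars.find s [':'] ≠ -1 :=
    (PySem.Chars.find_ne_neg_one_iff s [':']).mpr hin
  have hff : PySem.Chars.findFrom s [':'] ((0 : Nat) : Int) ≠ -1 := by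
    rw [show (((0 : Nat) : Int)) = (0 : Int) from rfl, PySem.Chars.findFrom_zero]
    exact hne
  obtain ⟨h0, hpref, hmin⟩ :=
    PySem.Chars.findFrom_natCast_spec s [':'] 0 (Nat.zero_le _) hff
  rw [show (((0 : Nat) : Int)) = (0 : Int) from rfl, PySem.Chars.findFrom_zero] at h0 hpref hmin
  set n := (PySem.Chars.find s [':']).toNat with hn
  have hcast : PySem.Chars.find s [':'] = (n : Int) := by
    have := (PySem.Chars.find_nonneg_iff s [':']).mpr hin
    omega
  rw [hcast]
  congr 1
  by_contra hneq
  rcases Nat.lt_or_ge n pre.length with hlt | hge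
  · -- the found index would point inside the colon-free prefix
    rcases hpref with ⟨t, ht⟩
    have hdrop : List.drop n s = List.drop n pre ++ ':' :: rest := by
      simp [hs, List.drop_append_of_le_length (Nat.le_of_lt hlt)]
    cases hd : List.drop n pre with
    | nil =>
        have := List.length_drop (l := pre) (i := n)
        rw [hd] at this
        simp at this
        omega
    | cons a b =>
        rw [hdrop, hd] at ht
        simp at ht
        exact hpre (ht.1 ▸ List.mem_of_mem_drop (hd ▸ List.mem_cons_self ..))
  · -- the colon at pre.length would contradict minimality
    have hplt : pre.length < n := lt_of_le_of_ne hge (fun h => hneq h.symm)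
    exact hmin pre.length (Nat.zero_le _) hplt ⟨rest, by simp [hs]⟩

theorem get_account_creation_date_spec : Claim_equal_get_account_creation_date := by
  intro full_file _ hpre
  unfold Spec_get_account_creation_date
  unfold get_account_creation_date get_account_creation_date_alt
  unfold Pre_get_account_creation_date at hpre
  rw [pvFind_rev_eq_filter_getLast] at hpre
  rw [pvFoldl_eq_filter_getLast]
  -- extract the common last matching line
  cases hlast : (full_file.filter (fun f => PySem.Str.isIn "createdAt" f)).getLast? with
  | none => rw [hlast] at hpre; simp at hpre
  | some f =>
      rw [hlast] at hpre
      simp only [Option.map_some, Option.getD_some] at hpre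
      have hne : (full_file.filter (fun f => PySem.Str.isIn "createdAt" f)).isEmpty = false := by
        cases hf : (full_file.filter (fun f => PySem.Str.isIn "createdAt" f)) with
        | nil => rw [hf] at hlast; simp at hlast
        | cons a b => simp
      have hgl : PySem.List.pyGet?
          (full_file.filter (fun f => PySem.Str.isIn "createdAt" f)) (-1) = some f := by
        rw [PySem.List.pyGet?_neg_one, hlast]
      simp only [Option.getD_some, hne, Bool.false_eq_true, if_false, hgl]
      -- now both sides parse the same line f, which contains ':'
      have hcolon : ':' ∈ f.toList := by
        have := (PySem.Chars.isIn_iff_infix (sub := (":" : String).toList)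
          (s := f.toList)).mp (by simpa using hpre)
        rcases this with ⟨s, t, hst⟩
        rw [show (":" : String).toList = [':'] from rfl] at hst
        rw [← hst]; simp
      -- decompose f at its first colon
      obtain ⟨pre, rest, hsplit, hnotin⟩ :
          ∃ pre rest, f.toList = pre ++ ':' :: rest ∧ ':' ∉ pre := by
        refine ⟨f.toList.takeWhile (fun c => !(c == ':')),
          (f.toList.dropWhile (fun c => !(c == ':'))).tail, ?_, ?_⟩
        · have hdw : f.toList.dropWhile (fun c => !(c == ':')) ≠ [] := by
            intro hnil
            have := List.takeWhile_append_dropWhile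
              (p := fun c => !(c == ':')) (l := f.toList)
            rw [hnil, List.append_nil] at this
            have hall := List.mem_takeWhile_imp (l := f.toList)
              (p := fun c => !(c == ':')) (x := ':') (by rw [this]; exact hcolon)
            simp at hall
          cases hdw' : f.toList.dropWhile (fun c => !(c == ':')) with
          | nil => exact absurd hdw' hdw
          | cons a b =>
              have ha := List.head_dropWhile_not (p := fun c => !(c == ':'))
                (l := f.toList) (by rw [hdw']; simp)
              simp only [hdw', List.head_cons] at ha
              simp at ha
              have heq := (List.takeWhile_append_dropWhile
                (p := fun c => !(c == ':')) (l := f.toList)).symm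
              rw [hdw'] at heq
              simpa [ha] using heq
        · intro hmem
          have := List.mem_takeWhile_imp hmem
          simp at this
      -- A side: the split field
      have hsplitA : (PySem.Str.split? f ":").getD []
          = (pvSplitColon [] f.toList).map String.ofList := by
        have : PySem.Str.split? f ":" = some (((PySem.Chars.splitOn f.toList [':'])).map String.ofList) := by
          simp [PySem.Str.split?, PySem.Chars.split?,
            show (":" : String).toList = [':'] from rfl]
        rw [this, Option.getD_some, pvSplitOn_eq]
      have hfield : (PySem.List.pyGet? ((PySem.Str.split? f ":").getD []) 1).getD ""
          = String.ofList (rest.takeWhile (fun c => !(c == ':'))) := by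
        rw [hsplitA, hsplit, pvSplitColon_append pre hnotin rest]
        have h1 : PySem.List.pyGet?
            ((([] ++ pre) :: pvSplitColon [] rest).map String.ofList) 1
            = ((pvSplitColon [] rest).map String.ofList)[0]? := by
          rw [show (1 : Int) = ((1 : Nat) : Int) from rfl, PySem.List.pyGet?_natCast]
          simp
        rw [h1]
        have h2 := pvSplitColon_head rest []
        cases hh : pvSplitColon [] rest with
        | nil => rw [hh] at h2; simp at h2
        | cons x xs =>
            rw [hh] at h2
            simp only [List.head?_cons, Option.some_inj] at h2
            simp [h2]
      rw [hfield]
      -- B side: find the first colon and run the scan on the segment after it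
      rw [hsplit, pvFind_colon pre rest hnotin]
      rw [show ((pre.length : Int) + 1) = ((pre.length + 1 : Nat) : Int) by push_cast; ring]
      rw [PySem.List.slice_from _ (by positivity)]
      rw [show ((pre.length + 1 : Nat) : Int).toNat = pre.length + 1 from by omega]
      have hdrop : List.drop (pre.length + 1) (pre ++ ':' :: rest) = rest := by
        rw [show pre.length + 1 = (pre ++ [':']).length by simp,
          show pre ++ ':' :: rest = (pre ++ [':']) ++ rest by simp]
        exact List.drop_left
      rw [hdrop, pvExtract_collect rest [] (by norm_num)]
      -- A side: reduce slice/replace/replace to take 10 of a filter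
      apply String.toList_inj.mp
      simp only [PySem.Str.toList_slice, PySem.Chars.slice_eq_listSlice,
        PySem.List.slice_zero_start, PySem.Str.toList_replace, String.toList_ofList]
      rw [PySem.List.slice_to _ (by norm_num)]
      norm_num
      rw [show ("\"" : String).toList = ['"'] from rfl,
        show (" " : String).toList = [' '] from rfl,
        pvReplace_filter, pvReplace_filter, List.filter_filter]
      simp only [List.nil_append, Nat.sub_zero, List.length_nil, Int.toNat]
      apply congrArg (List.take 10)
      apply List.filter_congr
      intro x _
      cases hx1 : x == '"' <;> cases hx2 : x == ' ' <;> simp_all [bne]
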